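-- pv_equiv track=rewrite | github.com/badrish-v-u/Test_app_1 | karaoke_live/app2.py | pick_sub
-- ===== SOURCE A (Python) =====
-- from typing import Optional
--
-- def pick_sub(info: dict) -> Optional[str]:
--     """Return a caption URL (vtt preferred) if present."""
--     def choose(subs: Optional[dict]):
--         if not subs: return None
--         # prefer 'en' if available
--         langs = ["en"] + [k for k in subs.keys() if k!="en"]
--         for lang in langs:
--             arr = subs.get(lang) or []
--             if arr:
--                 arr = sorted(arr, key=lambda x: 0 if x.get("ext")=="vtt" else 1)
--                 return arr[0].get("url")
--         return None
--     return choose(info.get("subtitles")) or choose(info.get("automatic_captions"))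
-- ===== SOURCE B (Python) =====
-- from typing import Optional
--
-- def pick_sub(info: dict) -> Optional[str]:
--     """Return a caption URL (vtt preferred) if present."""
--     def choose(subs: Optional[dict]):
--         if not subs:
--             return None
--         arr = subs.get("en") or next((v for v in subs.values() if v), None)
--         if not arr:
--             return None
--         hit = next((d for d in arr if d.get("ext") == "vtt"), arr[0])
--         return hit.get("url")
--     return choose(info.get("subtitles")) or choose(info.get("automatic_captions"))
-- ===== Notes on version B (the rewrite author's own statement) =====
-- stated objective: simpler
-- what changed: Replaced the per-language loop with its stable sort of each candidate list by a direct selection: take the 'en' list or else the first non-empty value, then a single linear scan returning the first 'vtt' entry's url (falling back to the list's first entry), with no langs list and no sorting.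
import Mathlib
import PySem

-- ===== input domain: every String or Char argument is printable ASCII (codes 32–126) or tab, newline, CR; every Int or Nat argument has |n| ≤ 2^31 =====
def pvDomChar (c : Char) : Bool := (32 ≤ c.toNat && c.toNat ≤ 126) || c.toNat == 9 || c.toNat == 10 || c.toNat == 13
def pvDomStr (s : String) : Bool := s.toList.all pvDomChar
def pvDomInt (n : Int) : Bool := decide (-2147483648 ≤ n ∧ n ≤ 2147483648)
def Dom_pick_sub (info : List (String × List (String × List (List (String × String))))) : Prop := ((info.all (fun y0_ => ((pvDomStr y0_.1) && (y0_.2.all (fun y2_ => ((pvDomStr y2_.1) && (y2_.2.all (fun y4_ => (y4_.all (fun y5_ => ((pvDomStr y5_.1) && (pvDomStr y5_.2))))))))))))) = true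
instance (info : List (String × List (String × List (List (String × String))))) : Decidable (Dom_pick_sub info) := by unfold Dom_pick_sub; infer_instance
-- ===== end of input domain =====

-- B replaces the per-language loop + stable sort of A by a direct selection (the 'en' list or the
-- first non-empty value, then one linear scan for the first 'vtt' entry): simpler, no sort.

-- shared primitive: d.get(k) on an association-list dict (first match)
def pvLk {α : Type} (xs : List (String × α)) (k : String) : Option α :=
  (List.find? (fun p => p.1 == k) xs).map (·.2)

-- shared primitive: Python's `x or y` on Optional[str] (None and "" are falsy)
def pvTruthyOr (a b : Option String) : Option String :=
  match a with
  | none => b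
  | some s => if s = "" then b else some s

-- shared predicate: x.get("ext") == "vtt"
def pvIsVtt (d : List (String × String)) : Bool := pvLk d "ext" == some "vtt"

-- ===== PORT A =====
-- sort key: 0 if x.get("ext")=="vtt" else 1
def pvVttKey (d : List (String × String)) : Int := if pvIsVtt d then 0 else 1

-- the `for lang in langs:` loop of A's choose
def chooseA_loop (subs : List (String × List (List (String × String)))) :
    List String → Option String
  | [] => none
  | lang :: rest =>
    let arr := (pvLk subs lang).getD []
    if arr.isEmpty then chooseA_loop subs rest
    else
      match PySem.List.sorted arr pvVttKey false with
      | [] => none          -- unreachable: sorted of a non-empty list is non-empty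
      | d :: _ => pvLk d "url"

def chooseA (subsO : Option (List (String × List (List (String × String))))) : Option String :=
  match subsO with
  | none => none
  | some subs =>
    if subs.isEmpty then none
    else chooseA_loop subs ("en" :: (subs.map (·.1)).filter (fun k => !(k == "en")))

def pick_sub (info : List (String × List (String × List (List (String × String))))) : Option String :=
  pvTruthyOr (chooseA (pvLk info "subtitles")) (chooseA (pvLk info "automatic_captions"))

-- ===== PORT B =====
def chooseB (subsO : Option (List (String × List (List (String × String))))) : Option String :=
  match subsO with
  | none => none
  | some subs =>
    if subs.isEmpty then none
    else
      -- arr = subs.get("en") or next((v for v in subs.values() if v), None)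
      let scan := (subs.map (·.2)).find? (fun v => !v.isEmpty)
      let arrO :=
        match pvLk subs "en" with
        | none => scan
        | some v => if v.isEmpty then scan else some v
      match arrO with
      | none => none
      | some [] => none
      | some (hd :: tl) =>
        -- hit = next((d for d in arr if d.get("ext") == "vtt"), arr[0])
        pvLk (((hd :: tl).find? pvIsVtt).getD hd) "url"

def pick_sub_alt (info : List (String × List (String × List (List (String × String))))) : Option String :=
  pvTruthyOr (chooseB (pvLk info "subtitles")) (chooseB (pvLk info "automatic_captions"))

-- ===== PRECONDITION & SPEC =====
-- Pre_ excludes association lists carrying a duplicate key in any of the dicts (info itself, a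
-- subtitle map, a caption entry): such lists do not represent Python dicts, and which of the
-- duplicate values a lookup sees is an accident of the encoding.
def Pre_pick_sub (info : List (String × List (String × List (List (String × String))))) : Prop :=
  (info.map (·.1)).Nodup ∧
  ∀ p ∈ info, (p.2.map (·.1)).Nodup ∧ ∀ q ∈ p.2, ∀ d ∈ q.2, (d.map (·.1)).Nodup
instance (info : List (String × List (String × List (List (String × String))))) : Decidable (Pre_pick_sub info) := by unfold Pre_pick_sub; infer_instance

def pvWitness_pick_sub : (List (String × List (String × List (List (String × String))))) :=
  [("subtitles", [("en", [[("ext", "srt"), ("url", "u1")], [("ext", "vtt"), ("url", "u2")]])])]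

def Spec_pick_sub (info : List (String × List (String × List (List (String × String))))) (out : Option String) : Prop := out = pick_sub_alt info
instance (info : List (String × List (String × List (List (String × String))))) (out : Option String) : Decidable (Spec_pick_sub info out) := by unfold Spec_pick_sub; infer_instance

-- ===== CLAIM (what is proved, stated in full; the proofs are below) =====
def Claim_equal_pick_sub : Prop := ∀ (info : List (String × List (String × List (List (String × String))))), Dom_pick_sub info → Pre_pick_sub info → Spec_pick_sub info (pick_sub info)

-- ===== LEMMAS AND PROOFS =====

-- inserting into a binary-key-split list keeps the split (stability of A's sort, made explicit)
lemma insertBy_split (x : List (String × String)) (A B : List (List (String × String)))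
    (hA : ∀ a ∈ A, pvIsVtt a = true) (hB : ∀ b ∈ B, pvIsVtt b = false) :
    PySem.List.insertBy (fun a b => decide (pvVttKey a < pvVttKey b)) x (A ++ B) =
      if pvIsVtt x then A ++ x :: B else (A ++ B) ++ [x] := by
  by_cases hx : pvIsVtt x = true
  · simp only [hx, if_true]
    induction A with
    | nil =>
      cases B with
      | nil => simp [PySem.List.insertBy]
      | cons b B' =>
        have hb : decide (pvVttKey x < pvVttKey b) = true := by
          simp [pvVttKey, hx, hB b (by simp)]
        simp [PySem.List.insertBy, hb]
    | cons a A' ih =>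
      have hba : decide (pvVttKey x < pvVttKey a) = false := by
        simp [pvVttKey, hx, hA a (by simp)]
      have ih' := ih (fun a' ha' => hA a' (by simp [ha']))
      simp only [List.cons_append, PySem.List.insertBy, hba, Bool.false_eq_true, if_false]
      rw [ih']
  · rw [Bool.not_eq_true] at hx
    have hforall : ∀ y ∈ A ++ B, decide (pvVttKey x < pvVttKey y) = false := by
      intro y hy
      simp only [pvVttKey, hx, Bool.false_eq_true, if_false, decide_eq_false_iff_not, not_lt]
      split <;> omega
    rw [PySem.List.insertBy_of_forall_not_before _ _ _ hforall]
    simp [hx]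

lemma foldl_ins_split (xs : List (List (String × String))) :
    ∀ ys : List (List (String × String)),
      xs.foldl (fun acc x => PySem.List.insertBy (fun a b => decide (pvVttKey a < pvVttKey b)) x acc)
        (ys.filter pvIsVtt ++ ys.filter (fun y => !pvIsVtt y)) =
      (ys ++ xs).filter pvIsVtt ++ (ys ++ xs).filter (fun y => !pvIsVtt y) := by
  induction xs with
  | nil => intro ys; simp
  | cons x xs' ih =>
    intro ys
    have hsplit := insertBy_split x (ys.filter pvIsVtt) (ys.filter (fun y => !pvIsVtt y))
      (fun a ha => (List.mem_filter.mp ha).2)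
      (fun b hb => by simpa using (List.mem_filter.mp hb).2)
    have key : PySem.List.insertBy (fun a b => decide (pvVttKey a < pvVttKey b)) x
        (ys.filter pvIsVtt ++ ys.filter (fun y => !pvIsVtt y)) =
        (ys ++ [x]).filter pvIsVtt ++ (ys ++ [x]).filter (fun y => !pvIsVtt y) := by
      rw [hsplit]
      by_cases hx : pvIsVtt x = true <;> simp [List.filter_append, hx]
    calc (x :: xs').foldl _ _
        = xs'.foldl (fun acc x => PySem.List.insertBy (fun a b => decide (pvVttKey a < pvVttKey b)) x acc)
            ((ys ++ [x]).filter pvIsVtt ++ (ys ++ [x]).filter (fun y => !pvIsVtt y)) := by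
          simp only [List.foldl_cons, key]
    _ = ((ys ++ [x]) ++ xs').filter pvIsVtt ++ ((ys ++ [x]) ++ xs').filter (fun y => !pvIsVtt y) := ih _
    _ = (ys ++ x :: xs').filter pvIsVtt ++ (ys ++ x :: xs').filter (fun y => !pvIsVtt y) := by
          simp

-- A's stable sort, characterised: vtt entries first (in order), then the rest (in order)
lemma sorted_vtt (arr : List (List (String × String))) :
    PySem.List.sorted arr pvVttKey false =
      arr.filter pvIsVtt ++ arr.filter (fun y => !pvIsVtt y) := by
  rw [PySem.List.sorted_eq_foldl_insertBy]
  simpa using foldl_ins_split arr []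

-- head of the sorted list = first vtt entry, else the original head
lemma head_sorted_vtt (hd : List (String × String)) (tl : List (List (String × String))) :
    (PySem.List.sorted (hd :: tl) pvVttKey false).head? =
      some (((hd :: tl).find? pvIsVtt).getD hd) := by
  rw [sorted_vtt]
  cases h : (hd :: tl).find? pvIsVtt with
  | some d =>
    have : ((hd :: tl).filter pvIsVtt).head? = some d := by rw [List.head?_filter, h]
    cases hf : (hd :: tl).filter pvIsVtt with
    | nil => rw [hf] at this; simp at this
    | cons a t => rw [hf] at this; simp at this; simp [this]
  | none =>
    have hall : ∀ x ∈ hd :: tl, ¬ pvIsVtt x = true := List.find?_eq_none.mp h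
    have h1 : (hd :: tl).filter pvIsVtt = [] := by
      rw [List.filter_eq_nil_iff]; exact hall
    have h2 : (hd :: tl).filter (fun y => !pvIsVtt y) = hd :: tl := by
      rw [List.filter_eq_self]; intro a ha; simpa using hall a ha
    simp [h1, h2]

-- the body A runs on a chosen non-empty list equals B's single scan
lemma resA_eq_resB (hd : List (String × String)) (tl : List (List (String × String))) :
    (match PySem.List.sorted (hd :: tl) pvVttKey false with
      | [] => none
      | d :: _ => pvLk d "url") =
    pvLk (((hd :: tl).find? pvIsVtt).getD hd) "url" := by
  have := head_sorted_vtt hd tl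
  cases hs : PySem.List.sorted (hd :: tl) pvVttKey false with
  | nil => rw [hs] at this; simp at this
  | cons d t => rw [hs] at this; simp at this; simp [this]

-- a Nodup association list looks up each of its members
lemma lk_of_mem {α : Type} (xs : List (String × α)) (hn : (xs.map (·.1)).Nodup)
    {k : String} {v : α} (hm : (k, v) ∈ xs) : pvLk xs k = some v := by
  induction xs with
  | nil => simp at hm
  | cons p t ih =>
    simp only [List.map_cons, List.nodup_cons] at hn
    rcases List.mem_cons.mp hm with h | h
    · simp [pvLk, ← h]
    · have hne : (p.1 == k) = false := by
        simp only [beq_eq_false_iff_ne, ne_eq]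
        intro he
        exact hn.1 (he ▸ (List.mem_map.mpr ⟨(k, v), h, rfl⟩))
      simp only [pvLk, List.find?_cons, hne]
      simpa [pvLk] using ih hn.2 h

-- A's language loop (after 'en' was found empty) = one scan over the values
lemma loopA_eq_scan (subs : List (String × List (List (String × String)))) :
    ∀ l : List (String × List (List (String × String))),
      (∀ p ∈ l, pvLk subs p.1 = some p.2) →
      ((pvLk subs "en").getD []).isEmpty = true →
      chooseA_loop subs ((l.map (·.1)).filter (fun k => !(k == "en"))) =
        match (l.map (·.2)).find? (fun v => !v.isEmpty) with
        | none => none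
        | some [] => none
        | some (hd :: tl) => pvLk (((hd :: tl).find? pvIsVtt).getD hd) "url" := by
  intro l
  induction l with
  | nil => intro _ _; simp [chooseA_loop]
  | cons p t ih =>
    intro hl hen
    have hk : pvLk subs p.1 = some p.2 := hl p (by simp)
    by_cases hke : p.1 = "en"
    · have hv : p.2 = [] := by
        rw [hke] at hk
        rw [hk] at hen
        simpa using hen
      have h1 : ((p :: t).map (·.1)).filter (fun k => !(k == "en")) =
          (t.map (·.1)).filter (fun k => !(k == "en")) := by
        simp [hke]
      have h2 : ((p :: t).map (·.2)).find? (fun v => !v.isEmpty) =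
          (t.map (·.2)).find? (fun v => !v.isEmpty) := by
        simp [hv]
      rw [h1, h2]
      exact ih (fun q hq => hl q (by simp [hq])) hen
    · have h1 : ((p :: t).map (·.1)).filter (fun k => !(k == "en")) =
          p.1 :: (t.map (·.1)).filter (fun k => !(k == "en")) := by
        simp [hke]
      rw [h1]
      show (let arr := (pvLk subs p.1).getD [];
            if arr.isEmpty then chooseA_loop subs ((t.map (·.1)).filter (fun k => !(k == "en")))
            else match PySem.List.sorted arr pvVttKey false with
              | [] => none
              | d :: _ => pvLk d "url") = _
      rw [hk]
      by_cases hv : p.2.isEmpty = true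
      · have hv' : p.2 = [] := by simpa using hv
        simp only [Option.getD_some, hv, if_true]
        have h2 : ((p :: t).map (·.2)).find? (fun v => !v.isEmpty) =
            (t.map (·.2)).find? (fun v => !v.isEmpty) := by
          simp [hv']
        rw [h2]
        exact ih (fun q hq => hl q (by simp [hq])) hen
      · cases hp2 : p.2 with
        | nil => rw [hp2] at hv; simp at hv
        | cons hd tl =>
          have h2 : ((p :: t).map (·.2)).find? (fun v => !v.isEmpty) = some (hd :: tl) := by
            simp [hp2]
          rw [h2]
          simp only [Option.getD_some, List.isEmpty_cons, if_false, Bool.false_eq_true]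
          exact resA_eq_resB hd tl

-- choose agrees on any Nodup-keyed dict (or None)
lemma chooseA_eq_chooseB (subsO : Option (List (String × List (List (String × String)))))
    (hn : ∀ subs, subsO = some subs → (subs.map (·.1)).Nodup) :
    chooseA subsO = chooseB subsO := by
  cases subsO with
  | none => rfl
  | some subs =>
    have hnd := hn subs rfl
    simp only [chooseA, chooseB]
    by_cases he : subs.isEmpty = true
    · simp [he]
    · simp only [he, if_false, Bool.false_eq_true]
      show (let arr := (pvLk subs "en").getD [];
            if arr.isEmpty then chooseA_loop subs ((subs.map (·.1)).filter (fun k => !(k == "en")))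
            else match PySem.List.sorted arr pvVttKey false with
              | [] => none
              | d :: _ => pvLk d "url") = _
      cases hen : pvLk subs "en" with
      | none =>
        simp only [Option.getD_none, List.isEmpty_nil, if_true]
        rw [loopA_eq_scan subs subs (fun p hp => lk_of_mem subs hnd hp) (by simp [hen])]
      | some v =>
        by_cases hv : v.isEmpty = true
        · simp only [Option.getD_some, hv, if_true]
          rw [loopA_eq_scan subs subs (fun p hp => lk_of_mem subs hnd hp) (by simp [hen, hv])]
        · cases v with
          | nil => simp at hv
          | cons hd tl =>
            simp only [Option.getD_some, hv, if_false, Bool.false_eq_true]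
            exact resA_eq_resB hd tl

-- value looked up in info has Nodup keys, from Pre_
lemma pre_value_nodup (info : List (String × List (String × List (List (String × String)))))
    (hpre : Pre_pick_sub info) (k : String)
    (subs : List (String × List (List (String × String))))
    (h : pvLk info k = some subs) : (subs.map (·.1)).Nodup := by
  unfold pvLk at h
  cases hf : List.find? (fun p => p.1 == k) info with
  | none => rw [hf] at h; simp at h
  | some pr =>
    rw [hf] at h
    simp only [Option.map_some, Option.some.injEq] at h
    have hm : pr ∈ info := List.mem_of_find?_eq_some hf
    exact h ▸ (hpre.2 pr hm).1

-- ===== VERDICT (by name: the statement is the Claim_ definition above) =====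
theorem pick_sub_spec : Claim_equal_pick_sub := by
  intro info _ hpre
  unfold Spec_pick_sub pick_sub pick_sub_alt
  rw [chooseA_eq_chooseB (pvLk info "subtitles") (pre_value_nodup info hpre "subtitles"),
      chooseA_eq_chooseB (pvLk info "automatic_captions") (pre_value_nodup info hpre "automatic_captions")]
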